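-- pv_equiv track=rewrite | github.com/ElianaHarriet/TDA | dyc.py | elemento_desordenado
-- ===== SOURCE A (Python) =====
-- def elemento_desordenado(arr):
--     if len(arr) == 1:
--         return None
--
--     middle = len(arr) // 2
--
--     first_half = arr[:middle]
--     second_half = arr[middle:]
--
--     if first_half[-1] > second_half[0]:
--         return second_half[0]
--
--     op1 = elemento_desordenado(first_half)
--     op2 = elemento_desordenado(second_half)
--
--     return op1 if op1 is not None else op2
-- ===== SOURCE B (Python) =====
-- def elemento_desordenado(arr):
--     stack = [(0, len(arr))]
--     while stack:
--         l, r = stack.pop()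
--         if r - l <= 1:
--             continue
--         m = l + (r - l) // 2
--         if arr[m - 1] > arr[m]:
--             return arr[m]
--         stack.append((m, r))
--         stack.append((l, m))
--     return None
-- ===== Notes on version B (the rewrite author's own statement) =====
-- stated objective: alternative
-- what changed: Replaced the slicing divide-and-conquer recursion by an iterative explicit-stack preorder scan over index intervals, so no sublists are ever copied.
import Mathlib
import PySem

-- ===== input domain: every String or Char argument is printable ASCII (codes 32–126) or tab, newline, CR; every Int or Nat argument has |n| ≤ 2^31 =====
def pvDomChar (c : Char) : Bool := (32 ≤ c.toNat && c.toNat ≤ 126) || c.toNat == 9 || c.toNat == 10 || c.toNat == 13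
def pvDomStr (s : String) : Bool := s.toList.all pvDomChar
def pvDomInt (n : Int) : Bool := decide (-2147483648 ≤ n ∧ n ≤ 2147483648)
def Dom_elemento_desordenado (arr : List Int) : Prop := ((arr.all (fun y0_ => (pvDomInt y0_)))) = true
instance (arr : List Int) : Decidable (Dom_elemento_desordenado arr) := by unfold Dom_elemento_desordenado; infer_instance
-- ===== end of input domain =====

-- B replaces A's slicing divide-and-conquer recursion by an iterative explicit-stack
-- preorder scan over index intervals (objective: alternative — no sublist copies).

-- ===== PORT A =====
-- Literal port of A, with a structural fuel counter as totality guard (fuel := arr.length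
-- suffices: each recursive call is on a strictly shorter list, so fuel 0 is unreachable).
-- The `arr.length = 0` branch is the path where Python raises IndexError (first_half[-1]
-- on []); it is excluded by Pre_.  middle / first_half / second_half are inlined.
def elemento_desordenado_go (fuel : Nat) (arr : List Int) : Option Int :=
  match fuel with
  | 0 => none  -- unreachable totality guard
  | fuel + 1 =>
    if arr.length = 1 then none
    else if arr.length = 0 then none  -- Python raises IndexError here; outside Pre_
    else if PySem.List.pyGetD (arr.take (arr.length / 2)) (-1) 0 >
            PySem.List.pyGetD (arr.drop (arr.length / 2)) 0 0 then
      some (PySem.List.pyGetD (arr.drop (arr.length / 2)) 0 0)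
    else if (elemento_desordenado_go fuel (arr.take (arr.length / 2))).isSome then
      elemento_desordenado_go fuel (arr.take (arr.length / 2))
    else
      elemento_desordenado_go fuel (arr.drop (arr.length / 2))

def elemento_desordenado (arr : List Int) : Option Int :=
  elemento_desordenado_go arr.length arr

-- ===== PORT B =====
-- the while-stack loop of Source B, as structural recursion on a fuel counter over the stack
-- of (l, r) index intervals (fuel := 2*n+1 suffices: each iteration strictly decreases
-- the total interval weight, so fuel 0 is unreachable)
def edStackGo (arr : List Int) (fuel : Nat) (st : List (Nat × Nat)) : Option Int :=
  match fuel, st with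
  | _, [] => none
  | 0, _ => none  -- unreachable totality guard
  | fuel + 1, (l, r) :: rest =>
    if r - l ≤ 1 then edStackGo arr fuel rest
    else if arr.getD (l + (r - l) / 2 - 1) 0 > arr.getD (l + (r - l) / 2) 0 then
      some (arr.getD (l + (r - l) / 2) 0)
    else
      edStackGo arr fuel ((l, l + (r - l) / 2) :: (l + (r - l) / 2, r) :: rest)

def elemento_desordenado_alt (arr : List Int) : Option Int :=
  edStackGo arr (2 * arr.length + 1) [(0, arr.length)]

-- ===== PRECONDITION & SPEC =====
-- Pre_ excludes only the empty list, on which Python A raises IndexError.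
def Pre_elemento_desordenado (arr : List Int) : Prop := arr ≠ []
instance (arr : List Int) : Decidable (Pre_elemento_desordenado arr) := by unfold Pre_elemento_desordenado; infer_instance
def pvWitness_elemento_desordenado : List Int := ([3, 1, 2])

def Spec_elemento_desordenado (arr : List Int) (out : Option Int) : Prop := out = elemento_desordenado_alt arr
instance (arr : List Int) (out : Option Int) : Decidable (Spec_elemento_desordenado arr out) := by unfold Spec_elemento_desordenado; infer_instance

-- ===== CLAIM (what is proved, stated in full; the proofs are below) =====
def Claim_equal_elemento_desordenado : Prop := ∀ (arr : List Int), Dom_elemento_desordenado arr → Pre_elemento_desordenado arr → Spec_elemento_desordenado arr (elemento_desordenado arr)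

-- ===== LEMMAS AND PROOFS =====

-- fuel-free version of A's recursion (proof helper)
def edA (arr : List Int) : Option Int :=
  if _h1 : arr.length = 1 then none
  else if _h0 : arr.length = 0 then none
  else if PySem.List.pyGetD (arr.take (arr.length / 2)) (-1) 0 >
          PySem.List.pyGetD (arr.drop (arr.length / 2)) 0 0 then
    some (PySem.List.pyGetD (arr.drop (arr.length / 2)) 0 0)
  else if (edA (arr.take (arr.length / 2))).isSome then
    edA (arr.take (arr.length / 2))
  else
    edA (arr.drop (arr.length / 2))
termination_by arr.length
decreasing_by
  all_goals simp only [List.length_take, List.length_drop]; omega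

-- fuel-free version of B's stack loop (proof helper)
def edStack (arr : List Int) : List (Nat × Nat) → Option Int
  | [] => none
  | (l, r) :: rest =>
    if _h : r - l ≤ 1 then edStack arr rest
    else if arr.getD (l + (r - l) / 2 - 1) 0 > arr.getD (l + (r - l) / 2) 0 then
      some (arr.getD (l + (r - l) / 2) 0)
    else
      edStack arr ((l, l + (r - l) / 2) :: (l + (r - l) / 2, r) :: rest)
termination_by st => (st.map (fun p => max (2 * (p.2 - p.1) - 1) 1)).sum
decreasing_by
  · simp only [List.map_cons, List.sum_cons]; omega
  · simp only [List.map_cons, List.sum_cons]; omega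

lemma goA_eq_edA : ∀ (fuel : Nat) (arr : List Int), arr.length ≤ fuel →
    elemento_desordenado_go fuel arr = edA arr := by
  intro fuel
  induction fuel with
  | zero =>
    intro arr h
    have harr : arr = [] := by
      cases arr with
      | nil => rfl
      | cons a t => simp at h
    subst harr
    rw [edA.eq_def]
    simp [elemento_desordenado_go]
  | succ fuel IH =>
    intro arr h
    rw [elemento_desordenado_go, edA.eq_def]
    by_cases h1 : arr.length = 1
    · simp [h1]
    by_cases h0 : arr.length = 0
    · have harr : arr = [] := List.length_eq_zero_iff.mp h0
      subst harr
      simp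
    rw [if_neg h1, if_neg h0, dif_neg h1, dif_neg h0]
    rw [IH (arr.take (arr.length / 2)) (by simp only [List.length_take]; omega),
        IH (arr.drop (arr.length / 2)) (by simp only [List.length_drop]; omega)]

-- total weight of the pending intervals on the stack
def stackW (st : List (Nat × Nat)) : Nat :=
  (st.map (fun p => max (2 * (p.2 - p.1) - 1) 1)).sum

lemma goS_eq_edStack (arr : List Int) : ∀ (fuel : Nat) (st : List (Nat × Nat)),
    stackW st ≤ fuel → edStackGo arr fuel st = edStack arr st := by
  intro fuel
  induction fuel with
  | zero =>
    intro st h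
    have hst : st = [] := by
      cases st with
      | nil => rfl
      | cons p t => simp [stackW] at h
    subst hst
    rw [edStack]
    rfl
  | succ fuel IH =>
    intro st h
    cases st with
    | nil => rw [edStack]; rfl
    | cons p rest =>
      obtain ⟨l, r⟩ := p
      rw [edStackGo, edStack]
      simp only [stackW, List.map_cons, List.sum_cons] at h
      by_cases h1 : r - l ≤ 1
      · rw [if_pos h1, dif_pos h1, IH rest (by simp only [stackW]; omega)]
      rw [if_neg h1, dif_neg h1]
      by_cases hc : arr.getD (l + (r - l) / 2 - 1) 0 > arr.getD (l + (r - l) / 2) 0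
      · rw [if_pos hc, if_pos hc]
      rw [if_neg hc, if_neg hc]
      exact IH _ (by simp only [stackW, List.map_cons, List.sum_cons]; omega)

-- the segment of arr between indices l and r (the sublist A's recursion works on)
def seg (arr : List Int) (l r : Nat) : List Int := (arr.drop l).take (r - l)

-- edA's answer on the segment [l, r), with size-≤-1 segments mapped to none
def segRes (arr : List Int) (l r : Nat) : Option Int :=
  if r - l ≤ 1 then none else edA (seg arr l r)

lemma seg_length (arr : List Int) (l r : Nat) (h : r ≤ arr.length) :
    (seg arr l r).length = r - l := by
  simp [seg]; omega

lemma edA_len_one (xs : List Int) (h : xs.length = 1) : edA xs = none := by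
  rw [edA.eq_def]; simp [h]

lemma seg_last (arr : List Int) (l m : Nat) (hlm : l < m) (hm : m ≤ arr.length) :
    PySem.List.pyGetD (seg arr l m) (-1) 0 = arr.getD (m - 1) 0 := by
  have hne : seg arr l m ≠ [] := by
    simp [seg, List.take_eq_nil_iff]; omega
  have h1 : PySem.List.pyGetD (seg arr l m) (-1) 0 = (seg arr l m).getLast hne :=
    PySem.List.pyGetD_neg_one _ 0 hne
  rw [h1, List.getLast_eq_getElem]
  rw [List.getD_eq_getElem _ _ (show m - 1 < arr.length by omega)]
  simp only [seg, List.getElem_take, List.getElem_drop]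
  congr 1
  simp
  omega

lemma seg_head (arr : List Int) (m r : Nat) (hmr : m < r) (hr : r ≤ arr.length) :
    PySem.List.pyGetD (seg arr m r) 0 0 = arr.getD m 0 := by
  rw [PySem.List.pyGetD_zero]
  rw [List.getD_eq_getElem _ _ (show 0 < (seg arr m r).length by simp [seg]; omega)]
  rw [List.getD_eq_getElem _ _ (show m < arr.length by omega)]
  simp [seg, List.getElem_take, List.getElem_drop]

lemma seg_take (arr : List Int) (l r k : Nat) (hk : l + k ≤ r) :
    (seg arr l r).take k = seg arr l (l + k) := by
  simp only [seg, List.take_take]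
  congr 1
  omega

lemma seg_drop (arr : List Int) (l r k : Nat) :
    (seg arr l r).drop k = seg arr (l + k) r := by
  simp only [seg, List.drop_take, List.drop_drop]
  congr 1
  omega

lemma segRes_eq (arr : List Int) (l r : Nat) (h1 : l < r) (h2 : r ≤ arr.length) :
    segRes arr l r = edA (seg arr l r) := by
  unfold segRes
  split_ifs with h
  · rw [edA_len_one _ (by rw [seg_length _ _ _ h2]; omega)]
  · rfl

lemma edStack_nil (arr : List Int) : edStack arr [] = none := by
  rw [edStack]

lemma edStack_eq_or (arr : List Int) :
    ∀ (s l r : Nat) (rest : List (Nat × Nat)), r - l = s → l ≤ r → r ≤ arr.length →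
      edStack arr ((l, r) :: rest) = (segRes arr l r).or (edStack arr rest) := by
  intro s
  induction s using Nat.strong_induction_on with
  | _ s IH =>
    intro l r rest hs hlr hr
    by_cases h1 : r - l ≤ 1
    · rw [edStack]
      simp [h1, segRes]
    · rw [edStack, dif_neg h1]
      have hml : l < l + (r - l) / 2 := by omega
      have hmr : l + (r - l) / 2 < r := by omega
      have hlen : (seg arr l r).length = r - l := seg_length arr l r hr
      -- unfold edA on the segment [l, r)
      have hA : edA (seg arr l r) =
          if arr.getD (l + (r - l) / 2 - 1) 0 > arr.getD (l + (r - l) / 2) 0 then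
            some (arr.getD (l + (r - l) / 2) 0)
          else
            if (edA (seg arr l (l + (r - l) / 2))).isSome then
              edA (seg arr l (l + (r - l) / 2))
            else edA (seg arr (l + (r - l) / 2) r) := by
        rw [edA.eq_def]
        rw [dif_neg (show ¬(seg arr l r).length = 1 by omega),
            dif_neg (show ¬(seg arr l r).length = 0 by omega)]
        rw [hlen, seg_take arr l r ((r - l) / 2) (by omega), seg_drop arr l r ((r - l) / 2)]
        rw [seg_last arr l _ hml (by omega), seg_head arr _ r hmr hr]
      rw [segRes_eq arr l r (by omega) hr, hA]
      split_ifs with hcmp hop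
      · rfl
      all_goals
        rw [IH ((r - l) / 2) (by omega) l (l + (r - l) / 2) _ (by omega) (by omega) (by omega),
            IH (r - (l + (r - l) / 2)) (by omega) (l + (r - l) / 2) r _ (by omega) (by omega) hr,
            segRes_eq arr l _ hml (by omega), segRes_eq arr _ r hmr hr]
      · -- op1 is some: (some _).or _ absorbs the tail
        obtain ⟨v, hv⟩ := Option.isSome_iff_exists.mp hop
        rw [hv]
        rfl
      · -- op1 is none
        rw [Option.not_isSome_iff_eq_none.mp hop]
        rfl

-- ===== VERDICT (by name: the statement is the Claim_ definition above) =====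
theorem elemento_desordenado_spec : Claim_equal_elemento_desordenado := by
  intro arr _ hpre
  unfold Spec_elemento_desordenado elemento_desordenado elemento_desordenado_alt
  rw [goA_eq_edA arr.length arr le_rfl]
  rw [goS_eq_edStack arr (2 * arr.length + 1) [(0, arr.length)]
      (by simp [stackW]; omega)]
  rw [edStack_eq_or arr arr.length 0 arr.length [] rfl (by omega) le_rfl]
  rw [segRes_eq arr 0 arr.length (by simpa [List.length_pos_iff] using hpre) le_rfl]
  rw [show seg arr 0 arr.length = arr by simp [seg]]
  rw [edStack_nil, Option.or_none]
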